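-- pv_equiv track=rewrite | github.com/Nidhood/Algorithm_analysis | taller_1/taller_1/recursive_solution.py | calcular_intersecciones
-- ===== SOURCE A (Python) =====
-- def calcular_interseccion(r1, r2):
--     """Calcula el área de intersección entre dos rectángulos."""
--     x_izq = max(r1[0][0], r2[0][0])
--     x_der = min(r1[1][0], r2[1][0])
--     y_arr = min(r1[0][1], r2[0][1])
--     y_aba = max(r1[1][1], r2[1][1])
--
--     if x_izq < x_der and y_aba < y_arr:
--         return (x_der - x_izq) * (y_arr - y_aba)
--     return 0
--
-- def calcular_intersecciones(S_izq, S_der):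
--     """Divide y conquista para calcular las intersecciones entre dos subconjuntos de rectángulos."""
--     if not S_izq or not S_der:
--         return 0
--     if len(S_izq) == 1 and len(S_der) == 1:
--         return calcular_interseccion(S_izq[0], S_der[0])
--
--     m1 = len(S_izq) // 2
--     m2 = len(S_der) // 2
--
--     A1 = calcular_intersecciones(S_izq[:m1], S_der[:m2])
--     A2 = calcular_intersecciones(S_izq[:m1], S_der[m2:])
--     A3 = calcular_intersecciones(S_izq[m1:], S_der[:m2])
--     A4 = calcular_intersecciones(S_izq[m1:], S_der[m2:])
--
--     return A1 + A2 + A3 + A4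
-- ===== SOURCE B (Python) =====
-- def _area(r1, r2):
--     w = min(r1[1][0], r2[1][0]) - max(r1[0][0], r2[0][0])
--     h = min(r1[0][1], r2[0][1]) - max(r1[1][1], r2[1][1])
--     if w > 0 and h > 0:
--         return w * h
--     return 0
--
-- def calcular_intersecciones(S_izq, S_der):
--     total = 0
--     for r1 in S_izq:
--         for r2 in S_der:
--             total += _area(r1, r2)
--     return total
-- ===== Notes on version B (the rewrite author's own statement) =====
-- stated objective: simpler
-- what changed: Replaced A's 4-way divide-and-conquer recursion with list slicing by a single direct double loop accumulating the per-pair intersection area.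
import Mathlib
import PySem

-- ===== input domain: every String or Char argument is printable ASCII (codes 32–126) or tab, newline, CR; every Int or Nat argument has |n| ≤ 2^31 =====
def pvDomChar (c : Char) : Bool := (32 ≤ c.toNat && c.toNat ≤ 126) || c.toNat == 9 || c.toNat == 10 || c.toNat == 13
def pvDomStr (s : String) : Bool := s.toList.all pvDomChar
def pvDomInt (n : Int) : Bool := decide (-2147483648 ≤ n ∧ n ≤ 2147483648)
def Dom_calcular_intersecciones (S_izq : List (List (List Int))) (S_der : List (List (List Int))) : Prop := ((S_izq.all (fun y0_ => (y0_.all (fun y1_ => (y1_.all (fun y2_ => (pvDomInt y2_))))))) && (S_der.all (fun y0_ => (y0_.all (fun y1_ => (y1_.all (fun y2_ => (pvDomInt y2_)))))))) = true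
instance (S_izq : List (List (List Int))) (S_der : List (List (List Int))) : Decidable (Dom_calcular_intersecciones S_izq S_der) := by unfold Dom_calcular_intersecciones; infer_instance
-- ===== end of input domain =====

-- B replaces A's divide-and-conquer recursion by a plain double loop over the rectangle pairs (simpler, no slicing).

-- ===== PORT A =====
-- accessor for Python's r[i][j] (indices 0/1, in range under Pre_)
def pvIdxA (r : List (List Int)) (i j : Int) : Int :=
  PySem.List.pyGetD (PySem.List.pyGetD r i []) j 0

def calcular_interseccion (r1 r2 : List (List Int)) : Int :=
  let x_izq := max (pvIdxA r1 0 0) (pvIdxA r2 0 0)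
  let x_der := min (pvIdxA r1 1 0) (pvIdxA r2 1 0)
  let y_arr := min (pvIdxA r1 0 1) (pvIdxA r2 0 1)
  let y_aba := max (pvIdxA r1 1 1) (pvIdxA r2 1 1)
  if x_izq < x_der ∧ y_aba < y_arr then (x_der - x_izq) * (y_arr - y_aba) else 0

-- A's recursion, with a fuel guard making it structural: the measure |S_izq|+|S_der| strictly
-- decreases at every recursive call, so fuel = |S_izq|+|S_der| (supplied by the wrapper below)
-- always suffices and the 0-fuel branch is never reached.
def pvCalcA : Nat → List (List (List Int)) → List (List (List Int)) → Int
  | 0, _, _ => 0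
  | fuel+1, S_izq, S_der =>
    if S_izq = [] ∨ S_der = [] then 0
    else if S_izq.length = 1 ∧ S_der.length = 1 then
      calcular_interseccion (PySem.List.pyGetD S_izq 0 []) (PySem.List.pyGetD S_der 0 [])
    else
      let m1 := PySem.Int.floordiv (PySem.List.len S_izq) 2
      let m2 := PySem.Int.floordiv (PySem.List.len S_der) 2
      let A1 := pvCalcA fuel (PySem.List.slice S_izq none (some m1)) (PySem.List.slice S_der none (some m2))
      let A2 := pvCalcA fuel (PySem.List.slice S_izq none (some m1)) (PySem.List.slice S_der (some m2) none)
      let A3 := pvCalcA fuel (PySem.List.slice S_izq (some m1) none) (PySem.List.slice S_der none (some m2))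
      let A4 := pvCalcA fuel (PySem.List.slice S_izq (some m1) none) (PySem.List.slice S_der (some m2) none)
      A1 + A2 + A3 + A4

def calcular_intersecciones (S_izq : List (List (List Int))) (S_der : List (List (List Int))) : Int :=
  pvCalcA (S_izq.length + S_der.length) S_izq S_der

-- ===== PORT B =====
-- accessor for r[i][j] used by B's helper _area
def pvIdxB (r : List (List Int)) (i j : Int) : Int :=
  PySem.List.pyGetD (PySem.List.pyGetD r i []) j 0

def pvArea (r1 r2 : List (List Int)) : Int :=
  let w := min (pvIdxB r1 1 0) (pvIdxB r2 1 0) - max (pvIdxB r1 0 0) (pvIdxB r2 0 0)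
  let h := min (pvIdxB r1 0 1) (pvIdxB r2 0 1) - max (pvIdxB r1 1 1) (pvIdxB r2 1 1)
  if 0 < w ∧ 0 < h then w * h else 0

def calcular_intersecciones_alt (S_izq : List (List (List Int))) (S_der : List (List (List Int))) : Int :=
  S_izq.foldl (fun total r1 => S_der.foldl (fun total r2 => total + pvArea r1 r2) total) 0

-- ===== PRECONDITION & SPEC =====
-- Pre_ excludes exactly the inputs on which the Python A raises IndexError: both lists nonempty
-- while some rectangle lacks two corner points of two coordinates each (B raises there too).
def pvWfRect (r : List (List Int)) : Prop :=
  2 ≤ r.length ∧ 2 ≤ (r.getD 0 []).length ∧ 2 ≤ (r.getD 1 []).length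

def Pre_calcular_intersecciones (S_izq : List (List (List Int))) (S_der : List (List (List Int))) : Prop :=
  S_izq = [] ∨ S_der = [] ∨ ((∀ r ∈ S_izq, pvWfRect r) ∧ (∀ r ∈ S_der, pvWfRect r))

instance (S_izq : List (List (List Int))) (S_der : List (List (List Int))) : Decidable (Pre_calcular_intersecciones S_izq S_der) := by
  unfold Pre_calcular_intersecciones pvWfRect; infer_instance

def pvWitness_calcular_intersecciones : List (List (List Int)) × List (List (List Int)) :=
  ([[[0, 2], [2, 0]]], [[[1, 3], [3, 1]]])

def Spec_calcular_intersecciones (S_izq : List (List (List Int))) (S_der : List (List (List Int))) (out : Int) : Prop := out = calcular_intersecciones_alt S_izq S_der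
instance (S_izq : List (List (List Int))) (S_der : List (List (List Int))) (out : Int) : Decidable (Spec_calcular_intersecciones S_izq S_der out) := by unfold Spec_calcular_intersecciones; infer_instance

-- ===== CLAIM (what is proved, stated in full; the proofs are below) =====
def Claim_equal_calcular_intersecciones : Prop := ∀ (S_izq : List (List (List Int))) (S_der : List (List (List Int))), Dom_calcular_intersecciones S_izq S_der → Pre_calcular_intersecciones S_izq S_der → Spec_calcular_intersecciones S_izq S_der (calcular_intersecciones S_izq S_der)

-- ===== LEMMAS AND PROOFS =====

theorem pvFloorLen {α : Type} (xs : List α) :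
    PySem.Int.floordiv (PySem.List.len xs) 2 = ((xs.length / 2 : Nat) : Int) := by
  rw [PySem.List.len_eq]
  exact_mod_cast PySem.Int.floordiv_natCast xs.length 2

-- the pair-sum both programs compute
def pvSum2 (S T : List (List (List Int))) : Int :=
  (S.map (fun r1 => (T.map (fun r2 => pvArea r1 r2)).sum)).sum

theorem pvAlt_eq_sum2 (S T : List (List (List Int))) :
    calcular_intersecciones_alt S T = pvSum2 S T := by
  unfold calcular_intersecciones_alt pvSum2
  simp [PySem.List.foldl_add]

theorem pvInter_eq_area (a b : List (List Int)) :
    calcular_interseccion a b = pvArea a b := by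
  simp only [calcular_interseccion, pvArea, pvIdxA, pvIdxB]
  split_ifs <;> first | rfl | (exfalso; omega)

theorem pvSum2_nil_right (S : List (List (List Int))) : pvSum2 S [] = 0 := by
  simp [pvSum2]

theorem pvSum2_append_left (X Y T : List (List (List Int))) :
    pvSum2 (X ++ Y) T = pvSum2 X T + pvSum2 Y T := by
  simp [pvSum2]

theorem pvSum2_append_right (S U V : List (List (List Int))) :
    pvSum2 S (U ++ V) = pvSum2 S U + pvSum2 S V := by
  induction S with
  | nil => simp [pvSum2]
  | cons a S ih =>
      simp only [pvSum2, List.map_cons, List.sum_cons, List.map_append, List.sum_append] at *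
      omega

theorem pvCalcA_eq_sum2 (fuel : Nat) (S T : List (List (List Int)))
    (h : S.length + T.length ≤ fuel) : pvCalcA fuel S T = pvSum2 S T := by
  induction fuel generalizing S T with
  | zero =>
      have hS : S = [] := by
        cases S <;> simp_all
      subst hS
      simp [pvCalcA, pvSum2]
  | succ fuel ih =>
      rw [pvCalcA]
      split_ifs with h1 h2
      · rcases h1 with rfl | rfl
        · simp [pvSum2]
        · rw [pvSum2_nil_right]
      · obtain ⟨a, rfl⟩ := List.length_eq_one_iff.mp h2.1
        obtain ⟨b, rfl⟩ := List.length_eq_one_iff.mp h2.2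
        simp [pvSum2, pvInter_eq_area]
      · push Not at h1
        have l1 := List.length_pos_of_ne_nil h1.1
        have l2 := List.length_pos_of_ne_nil h1.2
        simp only [pvFloorLen, PySem.List.slice_to_natCast, PySem.List.slice_from_natCast]
        rw [ih _ _ (by simp only [List.length_take]; omega),
            ih _ _ (by simp only [List.length_take, List.length_drop]; omega),
            ih _ _ (by simp only [List.length_take, List.length_drop]; omega),
            ih _ _ (by simp only [List.length_drop]; omega)]
        have hrw : pvSum2 S T
            = pvSum2 (S.take (S.length / 2) ++ S.drop (S.length / 2))
                     (T.take (T.length / 2) ++ T.drop (T.length / 2)) := by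
          rw [List.take_append_drop, List.take_append_drop]
        rw [hrw, pvSum2_append_left, pvSum2_append_right, pvSum2_append_right]
        ring

-- ===== VERDICT (by name: the statement is the Claim_ definition above) =====
theorem calcular_intersecciones_spec : Claim_equal_calcular_intersecciones := by
  intro S T _ _
  unfold Spec_calcular_intersecciones calcular_intersecciones
  rw [pvCalcA_eq_sum2 _ _ _ le_rfl, pvAlt_eq_sum2]
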